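-- pv_equiv track=rewrite | github.com/batihandev/unity-mcp-skills | tools/reextract_recipes.py | _find_statement_end
-- ===== SOURCE A (Python) =====
-- def _skip_strings_and_comments(source: str, i: int) -> int | None:
--     """If source[i] starts a string/char/comment, return the index just past it.
--     Otherwise return None. Handles //, /* */, "...", @"...", $"...", '...'."""
--     n = len(source)
--     c = source[i]
--     if c == '/' and i + 1 < n:
--         if source[i+1] == '/':
--             nl = source.find('\n', i)
--             return n if nl == -1 else nl
--         if source[i+1] == '*':
--             end = source.find('*/', i + 2)
--             return n if end == -1 else end + 2
--     if c == '"':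
--         # Handle preceding @ or $ or @$ / $@
--         is_verbatim = i > 0 and source[i-1] == '@'
--         is_interp_verbatim = i >= 2 and source[i-2:i] in ('@$', '$@')
--         j = i + 1
--         if is_verbatim or is_interp_verbatim:
--             while j < n:
--                 if source[j] == '"':
--                     if j + 1 < n and source[j+1] == '"':
--                         j += 2
--                         continue
--                     return j + 1
--                 j += 1
--             return n
--         # Regular or interpolated string — track braces in interpolations
--         is_interp = i > 0 and source[i-1] == '$'
--         while j < n:
--             if source[j] == '\\':
--                 j += 2
--                 continue
--             if is_interp and source[j] == '{' and j + 1 < n and source[j+1] != '{':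
--                 # Skip balanced {...} inside interpolation
--                 depth = 1
--                 j += 1
--                 while j < n and depth > 0:
--                     inner = _skip_strings_and_comments(source, j)
--                     if inner is not None:
--                         j = inner
--                         continue
--                     if source[j] == '{': depth += 1
--                     elif source[j] == '}': depth -= 1
--                     j += 1
--                 continue
--             if source[j] == '"':
--                 return j + 1
--             j += 1
--         return n
--     if c == "'":
--         j = i + 1
--         while j < n:
--             if source[j] == '\\':
--                 j += 2
--                 continue
--             if source[j] == "'":
--                 return j + 1
--             j += 1
--         return n
--     return None
--
-- def _find_statement_end(source: str, start: int) -> int: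
--     """Starting at a position right after the `return` keyword, find the index of
--     the terminating `;` at brace/paren depth 0 (relative to start). Returns the
--     index of the `;`, or -1 if not found."""
--     n = len(source)
--     i = start
--     paren = 0
--     brace = 0
--     bracket = 0
--     while i < n:
--         skipped = _skip_strings_and_comments(source, i)
--         if skipped is not None:
--             i = skipped
--             continue
--         c = source[i]
--         if c == '(': paren += 1
--         elif c == ')': paren -= 1
--         elif c == '{': brace += 1
--         elif c == '}': brace -= 1
--         elif c == '[': bracket += 1
--         elif c == ']': bracket -= 1
--         elif c == ';' and paren == 0 and brace == 0 and bracket == 0: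
--             return i
--         i += 1
--     return -1
-- ===== SOURCE B (Python) =====
-- def _find_statement_end(source: str, start: int) -> int:
--     """Streaming flat scan: one pass over the characters from `start`, keeping an
--     explicit stack of lexer contexts plus the two previously consumed characters
--     (p2, p1) as registers, so no lookbehind indexing is ever needed. Frames:
--     'lc' line comment, 'bc' block comment, 'vs' verbatim string, 'ch' char
--     literal, ('st', interp) string body, ('in', depth) interpolation hole."""
--     n = len(source)
--     if start >= n:
--         return -1
--     p1 = source[start - 1] if start >= 1 else None
--     p2 = source[start - 2] if start >= 2 else None
--     paren = brace = bracket = 0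
--     stack = []
--     i = start
--     while i < n:
--         c = source[i]
--         la = source[i + 1] if i + 1 < n else None   # one-char lookahead
--         top = stack[-1] if stack else None
--         if top is not None and top[0] == 'lc':
--             if c == '\n':
--                 stack.pop()                          # newline re-read in enclosing context
--                 continue
--             p2, p1, i = p1, c, i + 1
--         elif top is not None and top[0] == 'bc':
--             if c == '*' and la == '/':
--                 stack.pop(); p2, p1, i = c, la, i + 2
--             else:
--                 p2, p1, i = p1, c, i + 1
--         elif top is not None and top[0] == 'vs':
--             if c == '"':
--                 if la == '"':
--                     p2, p1, i = c, la, i + 2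
--                 else:
--                     stack.pop(); p2, p1, i = p1, c, i + 1
--             else:
--                 p2, p1, i = p1, c, i + 1
--         elif top is not None and top[0] == 'ch':
--             if c == '\\':
--                 p2, p1, i = c, la, i + 2
--             elif c == "'":
--                 stack.pop(); p2, p1, i = p1, c, i + 1
--             else:
--                 p2, p1, i = p1, c, i + 1
--         elif top is not None and top[0] == 'st':
--             if c == '\\':
--                 p2, p1, i = c, la, i + 2
--             elif top[1] and c == '{' and la is not None and la != '{':
--                 stack.append(('in', 1)); p2, p1, i = p1, c, i + 1
--             elif c == '"':
--                 stack.pop(); p2, p1, i = p1, c, i + 1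
--             else:
--                 p2, p1, i = p1, c, i + 1
--         else:
--             # detection context: normal code or an interpolation hole
--             if c == '/' and la == '/':
--                 stack.append(('lc',)); p2, p1, i = c, la, i + 2
--             elif c == '/' and la == '*':
--                 stack.append(('bc',)); p2, p1, i = c, la, i + 2
--             elif c == '"':
--                 if p1 == '@' or (p2, p1) in (('@', '$'), ('$', '@')):
--                     stack.append(('vs',))
--                 else:
--                     stack.append(('st', p1 == '$'))
--                 p2, p1, i = p1, c, i + 1
--             elif c == "'":
--                 stack.append(('ch',)); p2, p1, i = p1, c, i + 1
--             elif top is not None: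
--                 # interpolation hole: track nested braces
--                 d = top[1]
--                 if c == '{':
--                     stack[-1] = ('in', d + 1)
--                 elif c == '}':
--                     if d == 1: stack.pop()
--                     else: stack[-1] = ('in', d - 1)
--                 p2, p1, i = p1, c, i + 1
--             else:
--                 if c == '(': paren += 1
--                 elif c == ')': paren -= 1
--                 elif c == '{': brace += 1
--                 elif c == '}': brace -= 1
--                 elif c == '[': bracket += 1
--                 elif c == ']': bracket -= 1
--                 elif c == ';' and paren == 0 and brace == 0 and bracket == 0:
--                     return i
--                 p2, p1, i = p1, c, i + 1
--     return -1
-- ===== Notes on version B (the rewrite author's own statement) =====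
-- stated objective: alternative
-- what changed: The recursive skip-helper with str.find, slicing and lookbehind indexing is replaced by a single streaming pass that keeps an explicit stack of lexer-context frames plus the two previously consumed characters in registers (p2, p1), so string/comment skipping, the @/$ prefix tests and interpolation nesting are all handled by one flat state machine with at most one character of lookahead.
-- outside the precondition, e.g. on _find_statement_end('/$"@;;{', -6): A returns 4, B returns -1; on _find_statement_end('ab', -5): A raises IndexError, B raises IndexError
import Mathlib
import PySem

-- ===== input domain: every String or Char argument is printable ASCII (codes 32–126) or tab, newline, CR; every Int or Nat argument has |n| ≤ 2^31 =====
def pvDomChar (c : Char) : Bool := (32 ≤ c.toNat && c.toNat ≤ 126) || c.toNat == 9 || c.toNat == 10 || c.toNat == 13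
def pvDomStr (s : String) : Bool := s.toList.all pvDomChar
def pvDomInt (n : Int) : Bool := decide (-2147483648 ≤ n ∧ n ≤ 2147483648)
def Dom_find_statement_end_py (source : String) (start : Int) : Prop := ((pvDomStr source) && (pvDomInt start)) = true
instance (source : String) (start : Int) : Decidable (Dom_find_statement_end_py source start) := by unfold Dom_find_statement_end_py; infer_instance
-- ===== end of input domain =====

-- B replaces the recursive skipper (str.find, slicing, lookbehind) by one streaming pass with an
-- explicit stack of lexer contexts and two previous-character registers (alternative decomposition,
-- same cost); return value only, no mutation in either version.

-- ===== PORT A =====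
-- A-side helpers: literal transliteration of _skip_strings_and_comments and its while-loops.

-- cited by the ports' termination proofs (named so the proof terms stay tiny)
theorem pvDecStep {n j k : Int} (h1 : j < n) (h2 : j < k) : (n - k).toNat < (n - j).toNat := by
  omega

theorem pvLt1 (j : Int) : j < j + 1 := lt_add_one j

theorem pvLt2 (j : Int) : j < j + 2 := lt_add_of_pos_right j zero_lt_two

theorem pvLtMax (r j : Int) : j < max r (j + 1) := lt_of_lt_of_le (pvLt1 j) (le_max_right r (j + 1))

theorem pvDecL {n j k : Int} (a b : Nat) (h1 : j < n) (h2 : j < k) :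
    Prod.Lex (· < ·) (· < ·) ((n - k).toNat, a) ((n - j).toNat, b) :=
  Prod.Lex.left _ _ (pvDecStep h1 h2)

theorem pvDecR {n j : Int} {a b : Nat} (h : a < b) :
    Prod.Lex (· < ·) (· < ·) ((n - j).toNat, a) ((n - j).toNat, b) :=
  Prod.Lex.right _ h


-- verbatim-string scan: the `while j < n` loop of the @"…" branch
def pvVerbLoop (cs : List Char) (j : Int) : Int :=
  if h : j < (cs.length : Int) then
    if PySem.List.pyGet? cs j = some '"' then
      if j + 1 < (cs.length : Int) ∧ PySem.List.pyGet? cs (j + 1) = some '"' then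
        pvVerbLoop cs (j + 2)
      else j + 1
    else pvVerbLoop cs (j + 1)
  else (cs.length : Int)
termination_by ((cs.length : Int) - j).toNat
decreasing_by
  · exact pvDecStep h (pvLt2 j)
  · exact pvDecStep h (pvLt1 j)

-- char-literal scan: the `while j < n` loop of the '…' branch
def pvCharLoop (cs : List Char) (j : Int) : Int :=
  if h : j < (cs.length : Int) then
    if PySem.List.pyGet? cs j = some '\\' then pvCharLoop cs (j + 2)
    else if PySem.List.pyGet? cs j = some '\'' then j + 1
    else pvCharLoop cs (j + 1)
  else (cs.length : Int)
termination_by ((cs.length : Int) - j).toNat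
decreasing_by
  · exact pvDecStep h (pvLt2 j)
  · exact pvDecStep h (pvLt1 j)

-- cited by the ports' termination proofs
theorem pvGet_lt {cs : List Char} {i : Int} {c : Char}
    (h : PySem.List.pyGet? cs i = some c) : i < (cs.length : Int) := by
  by_contra hn
  have : PySem.List.pyGet? cs i = none :=
    (PySem.List.pyGet?_eq_none_iff cs i).mpr (fun hr => hn hr.2)
  rw [this] at h; cases h

mutual
-- _skip_strings_and_comments(source, i)
def pvSkip (cs : List Char) (i : Int) : Option Int :=
  match hc : PySem.List.pyGet? cs i with
  | none => none  -- source[i]: IndexError in Python; never reached for 0 ≤ start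
  | some c =>
    if c = '/' ∧ i + 1 < (cs.length : Int) ∧ PySem.List.pyGet? cs (i + 1) = some '/' then
      some (if PySem.Chars.findFrom cs ['\n'] i = -1 then (cs.length : Int)
            else PySem.Chars.findFrom cs ['\n'] i)
    else if c = '/' ∧ i + 1 < (cs.length : Int) ∧ PySem.List.pyGet? cs (i + 1) = some '*' then
      some (if PySem.Chars.findFrom cs ['*', '/'] (i + 2) = -1 then (cs.length : Int)
            else PySem.Chars.findFrom cs ['*', '/'] (i + 2) + 2)
    else if c = '"' then
      if (0 < i ∧ PySem.List.pyGet? cs (i - 1) = some '@') ∨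
         (2 ≤ i ∧ (PySem.List.slice cs (some (i - 2)) (some i) = ['@', '$'] ∨
                   PySem.List.slice cs (some (i - 2)) (some i) = ['$', '@'])) then
        some (pvVerbLoop cs (i + 1))
      else
        some (pvStrLoop cs (decide (0 < i ∧ PySem.List.pyGet? cs (i - 1) = some '$')) (i + 1))
    else if c = '\'' then
      some (pvCharLoop cs (i + 1))
    else none
termination_by (((cs.length : Int) - i).toNat, 0)
decreasing_by
  · exact pvDecL _ _ (pvGet_lt hc) (pvLt1 i)

-- regular / interpolated string scan: the second `while j < n` loop of the '"' branch
def pvStrLoop (cs : List Char) (interp : Bool) (j : Int) : Int :=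
  if h : j < (cs.length : Int) then
    if PySem.List.pyGet? cs j = some '\\' then pvStrLoop cs interp (j + 2)
    else if interp = true ∧ PySem.List.pyGet? cs j = some '{' ∧ j + 1 < (cs.length : Int) ∧
              PySem.List.pyGet? cs (j + 1) ≠ some '{' then
      -- `max … (j+1)` is a termination guard only: pvInterpLoop never returns below its argument
      pvStrLoop cs interp (max (pvInterpLoop cs 1 (j + 1)) (j + 1))
    else if PySem.List.pyGet? cs j = some '"' then j + 1
    else pvStrLoop cs interp (j + 1)
  else (cs.length : Int)
termination_by (((cs.length : Int) - j).toNat, 2)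
decreasing_by
  · exact pvDecL _ _ h (pvLt2 j)
  · exact pvDecL _ _ h (pvLt1 j)
  · exact pvDecL _ _ h (pvLtMax _ _)
  · exact pvDecL _ _ h (pvLt1 j)

-- the `while j < n and depth > 0` loop inside an interpolation hole
def pvInterpLoop (cs : List Char) (d : Int) (j : Int) : Int :=
  if h : j < (cs.length : Int) ∧ 0 < d then
    -- h is cited by the termination proof
    match pvSkip cs j with
    | some r => pvInterpLoop cs d (max r (j + 1))  -- max: termination guard only, pvSkip always advances
    | none =>
      if PySem.List.pyGet? cs j = some '{' then pvInterpLoop cs (d + 1) (j + 1)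
      else if PySem.List.pyGet? cs j = some '}' then pvInterpLoop cs (d - 1) (j + 1)
      else pvInterpLoop cs d (j + 1)
  else j
termination_by (((cs.length : Int) - j).toNat, 1)
decreasing_by
  · exact pvDecR Nat.zero_lt_one
  · exact pvDecL _ _ h.1 (pvLtMax _ _)
  · exact pvDecL _ _ h.1 (pvLt1 j)
  · exact pvDecL _ _ h.1 (pvLt1 j)
  · exact pvDecL _ _ h.1 (pvLt1 j)
end

-- the main `while i < n` loop of _find_statement_end
def pvFindLoop (cs : List Char) (i p b k : Int) : Int :=
  if h : i < (cs.length : Int) then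
    match pvSkip cs i with
    | some r => pvFindLoop cs (max r (i + 1)) p b k  -- max: termination guard only, pvSkip always advances
    | none =>
      match PySem.List.pyGet? cs i with
      | none => -1  -- IndexError in Python; never reached for 0 ≤ start
      | some c =>
        if c = '(' then pvFindLoop cs (i + 1) (p + 1) b k
        else if c = ')' then pvFindLoop cs (i + 1) (p - 1) b k
        else if c = '{' then pvFindLoop cs (i + 1) p (b + 1) k
        else if c = '}' then pvFindLoop cs (i + 1) p (b - 1) k
        else if c = '[' then pvFindLoop cs (i + 1) p b (k + 1)
        else if c = ']' then pvFindLoop cs (i + 1) p b (k - 1)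
        else if c = ';' ∧ p = 0 ∧ b = 0 ∧ k = 0 then i
        else pvFindLoop cs (i + 1) p b k
  else -1
termination_by ((cs.length : Int) - i).toNat
decreasing_by
  · exact pvDecStep h (pvLtMax _ _)
  all_goals exact pvDecStep h (pvLt1 i)

def find_statement_end_py (source : String) (start : Int) : Int :=
  pvFindLoop source.toList start 0 0 0

-- ===== PORT B =====
-- B's port follows Source B: one streaming scan over the remaining characters, an explicit stack of
-- lexer-context frames, and the two previously consumed characters kept in registers p2, p1.

-- one lexer-context frame of the explicit stack
inductive PvFrame
  | lc                  -- line comment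
  | bc                  -- block comment
  | vs                  -- verbatim string
  | ch                  -- char literal
  | st (interp : Bool)  -- string body
  | itp (d : Int)       -- interpolation hole, brace depth d
deriving DecidableEq, Repr

-- cited by pvStep's termination proof
theorem pvSDec1 {α β : Type} (c : α) (tl : List α) (x y : List β) :
    Prod.Lex (· < ·) (· < ·) (tl.length, x.length) ((c :: tl).length, y.length) :=
  Prod.Lex.left _ _ (by simp)

theorem pvSDec2 {α β : Type} (c : α) (tl : List α) (x y : List β) :
    Prod.Lex (· < ·) (· < ·) (tl.tail.length, x.length) ((c :: tl).length, y.length) :=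
  Prod.Lex.left _ _ (by simp [List.length_tail])

theorem pvSDec3 {α β : Type} (r : List α) (f : β) (t : List β) :
    Prod.Lex (· < ·) (· < ·) (r.length, t.length) (r.length, (f :: t).length) :=
  Prod.Lex.right _ (by simp)

-- the `p1 = source[start-1] if start >= 1 else None` register initialisation of Source B
def pvPrevAt (cs : List Char) (i : Int) : Option Char :=
  if 1 ≤ i then PySem.List.pyGet? cs (i - 1) else none

-- the single streaming `while i < n` scan of Source B: `rest` is the unread suffix, `pos` the absolute
-- index of its first character, p2/p1 the two previously consumed characters, s the context stack
def pvStep (rest : List Char) (pos : Int) (p2 p1 : Option Char) (p b k : Int)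
    (s : List PvFrame) : Int :=
  match rest with
  | [] => -1
  | c :: tl =>
    match s with
    | PvFrame.lc :: t =>
      if c = '\n' then pvStep (c :: tl) pos p2 p1 p b k t  -- newline re-read in enclosing context
      else pvStep tl (pos + 1) p1 (some c) p b k (PvFrame.lc :: t)
    | PvFrame.bc :: t =>
      if c = '*' ∧ tl.head? = some '/' then pvStep tl.tail (pos + 2) (some c) tl.head? p b k t
      else pvStep tl (pos + 1) p1 (some c) p b k (PvFrame.bc :: t)
    | PvFrame.vs :: t =>
      if c = '"' then
        if tl.head? = some '"' then
          pvStep tl.tail (pos + 2) (some c) tl.head? p b k (PvFrame.vs :: t)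
        else pvStep tl (pos + 1) p1 (some c) p b k t
      else pvStep tl (pos + 1) p1 (some c) p b k (PvFrame.vs :: t)
    | PvFrame.ch :: t =>
      if c = '\\' then pvStep tl.tail (pos + 2) (some c) tl.head? p b k (PvFrame.ch :: t)
      else if c = '\'' then pvStep tl (pos + 1) p1 (some c) p b k t
      else pvStep tl (pos + 1) p1 (some c) p b k (PvFrame.ch :: t)
    | PvFrame.st interp :: t =>
      if c = '\\' then pvStep tl.tail (pos + 2) (some c) tl.head? p b k (PvFrame.st interp :: t)
      else if interp = true ∧ c = '{' ∧ tl.head?.any (fun c2 => c2 != '{') = true then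
        pvStep tl (pos + 1) p1 (some c) p b k (PvFrame.itp 1 :: PvFrame.st interp :: t)
      else if c = '"' then pvStep tl (pos + 1) p1 (some c) p b k t
      else pvStep tl (pos + 1) p1 (some c) p b k (PvFrame.st interp :: t)
    | s =>
      -- detection context: normal code or an interpolation hole
      if c = '/' ∧ tl.head? = some '/' then
        pvStep tl.tail (pos + 2) (some c) tl.head? p b k (PvFrame.lc :: s)
      else if c = '/' ∧ tl.head? = some '*' then
        pvStep tl.tail (pos + 2) (some c) tl.head? p b k (PvFrame.bc :: s)
      else if c = '"' then
        if p1 = some '@' ∨ (p2 = some '@' ∧ p1 = some '$') ∨ (p2 = some '$' ∧ p1 = some '@') then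
          pvStep tl (pos + 1) p1 (some c) p b k (PvFrame.vs :: s)
        else pvStep tl (pos + 1) p1 (some c) p b k (PvFrame.st (decide (p1 = some '$')) :: s)
      else if c = '\'' then pvStep tl (pos + 1) p1 (some c) p b k (PvFrame.ch :: s)
      else
        match s with
        | PvFrame.itp d :: t =>
          -- interpolation hole: track nested braces
          if c = '{' then pvStep tl (pos + 1) p1 (some c) p b k (PvFrame.itp (d + 1) :: t)
          else if c = '}' then
            if d = 1 then pvStep tl (pos + 1) p1 (some c) p b k t
            else pvStep tl (pos + 1) p1 (some c) p b k (PvFrame.itp (d - 1) :: t)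
          else pvStep tl (pos + 1) p1 (some c) p b k (PvFrame.itp d :: t)
        | _ =>
          -- normal context: depth counters and the terminating ';'
          if c = '(' then pvStep tl (pos + 1) p1 (some c) (p + 1) b k s
          else if c = ')' then pvStep tl (pos + 1) p1 (some c) (p - 1) b k s
          else if c = '{' then pvStep tl (pos + 1) p1 (some c) p (b + 1) k s
          else if c = '}' then pvStep tl (pos + 1) p1 (some c) p (b - 1) k s
          else if c = '[' then pvStep tl (pos + 1) p1 (some c) p b (k + 1) s
          else if c = ']' then pvStep tl (pos + 1) p1 (some c) p b (k - 1) s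
          else if c = ';' ∧ p = 0 ∧ b = 0 ∧ k = 0 then pos
          else pvStep tl (pos + 1) p1 (some c) p b k s
termination_by (rest.length, s.length)
decreasing_by
  all_goals first
    | exact pvSDec3 _ _ _
    | exact pvSDec1 _ _ _ _
    | exact pvSDec2 _ _ _ _

def find_statement_end_py_alt (source : String) (start : Int) : Int :=
  if (source.toList.length : Int) ≤ start then -1
  else
    pvStep (source.toList.drop start.toNat) start
      (pvPrevAt source.toList (start - 1)) (pvPrevAt source.toList start) 0 0 0 []

-- ===== PRECONDITION & SPEC =====
-- Pre_ excludes negative start: for start < -len(source) A raises IndexError, and for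
-- -len(source) ≤ start < 0 Python's negative-index wraparound combined with str.find's
-- forward clamping gives accidental results that B's forward scan does not reproduce.
def Pre_find_statement_end_py (source : String) (start : Int) : Prop := 0 ≤ start
instance (source : String) (start : Int) : Decidable (Pre_find_statement_end_py source start) := by
  unfold Pre_find_statement_end_py; infer_instance

def pvWitness_find_statement_end_py : String × Int := ("a;", 0)

def Spec_find_statement_end_py (source : String) (start : Int) (out : Int) : Prop :=
  out = find_statement_end_py_alt source start
instance (source : String) (start : Int) (out : Int) : Decidable (Spec_find_statement_end_py source start out) := by
  unfold Spec_find_statement_end_py; infer_instance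

-- ===== CLAIM (what is proved, stated in full; the proofs are below) =====
def Claim_equal_find_statement_end_py : Prop :=
  ∀ (source : String) (start : Int), Dom_find_statement_end_py source start →
    Pre_find_statement_end_py source start →
    Spec_find_statement_end_py source start (find_statement_end_py source start)

-- ===== LEMMAS AND PROOFS =====

-- proof-only intermediate: an INDEXED restatement of B's stack machine, used as a stepping stone
-- between A's recursive skipper and B's streaming port.

theorem pvLtLen (x : PvFrame) (t : List PvFrame) : t.length < (x :: t).length := by
  simp

def pvRun (cs : List Char) (i p b k : Int) (s : List PvFrame) : Int :=
  if h : i < (cs.length : Int) then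
    match PySem.List.pyGet? cs i with
    | none => -1
    | some c =>
      match s with
      | PvFrame.lc :: t =>
        if c = '\n' then pvRun cs i p b k t
        else pvRun cs (i + 1) p b k (PvFrame.lc :: t)
      | PvFrame.bc :: t =>
        if c = '*' ∧ i + 1 < (cs.length : Int) ∧ PySem.List.pyGet? cs (i + 1) = some '/' then
          pvRun cs (i + 2) p b k t
        else pvRun cs (i + 1) p b k (PvFrame.bc :: t)
      | PvFrame.vs :: t =>
        if c = '"' then
          if i + 1 < (cs.length : Int) ∧ PySem.List.pyGet? cs (i + 1) = some '"' then
            pvRun cs (i + 2) p b k (PvFrame.vs :: t)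
          else pvRun cs (i + 1) p b k t
        else pvRun cs (i + 1) p b k (PvFrame.vs :: t)
      | PvFrame.ch :: t =>
        if c = '\\' then pvRun cs (i + 2) p b k (PvFrame.ch :: t)
        else if c = '\'' then pvRun cs (i + 1) p b k t
        else pvRun cs (i + 1) p b k (PvFrame.ch :: t)
      | PvFrame.st interp :: t =>
        if c = '\\' then pvRun cs (i + 2) p b k (PvFrame.st interp :: t)
        else if interp = true ∧ c = '{' ∧ i + 1 < (cs.length : Int) ∧
                  PySem.List.pyGet? cs (i + 1) ≠ some '{' then
          pvRun cs (i + 1) p b k (PvFrame.itp 1 :: PvFrame.st interp :: t)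
        else if c = '"' then pvRun cs (i + 1) p b k t
        else pvRun cs (i + 1) p b k (PvFrame.st interp :: t)
      | _ =>
        if c = '/' ∧ i + 1 < (cs.length : Int) ∧ PySem.List.pyGet? cs (i + 1) = some '/' then
          pvRun cs (i + 2) p b k (PvFrame.lc :: s)
        else if c = '/' ∧ i + 1 < (cs.length : Int) ∧ PySem.List.pyGet? cs (i + 1) = some '*' then
          pvRun cs (i + 2) p b k (PvFrame.bc :: s)
        else if c = '"' then
          if (0 < i ∧ PySem.List.pyGet? cs (i - 1) = some '@') ∨
             (2 ≤ i ∧ (PySem.List.slice cs (some (i - 2)) (some i) = ['@', '$'] ∨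
                       PySem.List.slice cs (some (i - 2)) (some i) = ['$', '@'])) then
            pvRun cs (i + 1) p b k (PvFrame.vs :: s)
          else
            pvRun cs (i + 1) p b k
              (PvFrame.st (decide (0 < i ∧ PySem.List.pyGet? cs (i - 1) = some '$')) :: s)
        else if c = '\'' then
          pvRun cs (i + 1) p b k (PvFrame.ch :: s)
        else
          match s with
          | PvFrame.itp d :: t =>
            if c = '{' then pvRun cs (i + 1) p b k (PvFrame.itp (d + 1) :: t)
            else if c = '}' then
              if d = 1 then pvRun cs (i + 1) p b k t
              else pvRun cs (i + 1) p b k (PvFrame.itp (d - 1) :: t)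
            else pvRun cs (i + 1) p b k (PvFrame.itp d :: t)
          | _ =>
            if c = '(' then pvRun cs (i + 1) (p + 1) b k s
            else if c = ')' then pvRun cs (i + 1) (p - 1) b k s
            else if c = '{' then pvRun cs (i + 1) p (b + 1) k s
            else if c = '}' then pvRun cs (i + 1) p (b - 1) k s
            else if c = '[' then pvRun cs (i + 1) p b (k + 1) s
            else if c = ']' then pvRun cs (i + 1) p b (k - 1) s
            else if c = ';' ∧ p = 0 ∧ b = 0 ∧ k = 0 then i
            else pvRun cs (i + 1) p b k s
  else -1
termination_by (((cs.length : Int) - i).toNat, s.length)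
decreasing_by
  all_goals first
    | exact pvDecR (pvLtLen _ _)
    | exact pvDecL _ _ h (pvLt1 i)
    | exact pvDecL _ _ h (pvLt2 i)

-- ==== findFrom facts (derived from the PySem spec lemmas, not re-proved by induction) ====

theorem pvFF_past (s sub : List Char) (hsub : sub ≠ []) :
    PySem.Chars.findFrom s sub (s.length : Int) = -1 := by
  rw [PySem.Chars.findFrom_natCast_eq_neg_one_iff s sub s.length le_rfl]
  rw [List.drop_length]
  simp [List.infix_nil, hsub]

theorem pvFF_here (s sub : List Char) (k : Nat) (hk : k ≤ s.length)
    (hpre : sub <+: s.drop k) : PySem.Chars.findFrom s sub (k : Int) = (k : Int) := by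
  have hne : PySem.Chars.findFrom s sub (k : Int) ≠ -1 := by
    rw [Ne, PySem.Chars.findFrom_natCast_eq_neg_one_iff s sub k hk]
    exact fun h => h hpre.isInfix
  obtain ⟨h1, h2, h3⟩ := PySem.Chars.findFrom_natCast_spec s sub k hk hne
  by_contra hne2
  have : k < (PySem.Chars.findFrom s sub (k : Int)).toNat := by omega
  exact h3 k le_rfl this hpre

theorem pvFF_step (s sub : List Char) (k : Nat) (hk : k < s.length)
    (hnpre : ¬ sub <+: s.drop k) :
    PySem.Chars.findFrom s sub (k : Int) = PySem.Chars.findFrom s sub ((k : Int) + 1) := by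
  have hk1 : k + 1 ≤ s.length := hk
  have hdrop : s.drop k = s[k] :: s.drop (k + 1) := List.drop_eq_getElem_cons hk
  have hcast : ((k : Int) + 1) = ((k + 1 : Nat) : Int) := by push_cast; ring
  rw [hcast]
  by_cases h1 : PySem.Chars.findFrom s sub ((k + 1 : Nat) : Int) = -1
  · rw [h1]
    rw [PySem.Chars.findFrom_natCast_eq_neg_one_iff s sub k (le_of_lt hk)]
    rw [PySem.Chars.findFrom_natCast_eq_neg_one_iff s sub (k+1) hk1] at h1
    intro hin
    rw [hdrop, List.infix_cons_iff] at hin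
    rcases hin with h | h
    · rw [← hdrop] at h; exact hnpre h
    · exact h1 h
  · obtain ⟨hb1, hb2, hb3⟩ := PySem.Chars.findFrom_natCast_spec s sub (k+1) hk1 h1
    set f' := PySem.Chars.findFrom s sub ((k + 1 : Nat) : Int) with hf'
    have hne : PySem.Chars.findFrom s sub (k : Int) ≠ -1 := by
      rw [Ne, PySem.Chars.findFrom_natCast_eq_neg_one_iff s sub k (le_of_lt hk)]
      intro hnin
      apply hnin
      have hdd : List.drop f'.toNat s = List.drop (f'.toNat - k) (List.drop k s) := by
        rw [List.drop_drop]; congr 1; omega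
      rw [hdd] at hb2
      exact hb2.isInfix.trans (List.drop_suffix (f'.toNat - k) (List.drop k s)).isInfix
    obtain ⟨ha1, ha2, ha3⟩ := PySem.Chars.findFrom_natCast_spec s sub k (le_of_lt hk) hne
    set f := PySem.Chars.findFrom s sub (k : Int) with hf
    have hfk : f.toNat ≠ k := by
      intro h; apply hnpre; rw [← h]; exact ha2
    have h5 : ¬ f.toNat < f'.toNat := by
      intro hlt
      exact hb3 f.toNat (by omega) hlt ha2
    have h6 : ¬ f'.toNat < f.toNat := by
      intro hlt
      exact ha3 f'.toNat (by omega) hlt hb2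
    omega


-- ==== small unfolding helpers ====

theorem pvRun_ge (cs : List Char) (i p b k : Int) (s : List PvFrame)
    (h : (cs.length : Int) ≤ i) : pvRun cs i p b k s = -1 := by
  rw [pvRun.eq_def, dif_neg (by omega)]

theorem pvCharLoop_ge (cs : List Char) (j : Int) (h : (cs.length : Int) ≤ j) :
    pvCharLoop cs j = (cs.length : Int) := by
  rw [pvCharLoop.eq_def, dif_neg (by omega)]

theorem pvVerbLoop_ge (cs : List Char) (j : Int) (h : (cs.length : Int) ≤ j) :
    pvVerbLoop cs j = (cs.length : Int) := by
  rw [pvVerbLoop.eq_def, dif_neg (by omega)]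

theorem pvStrLoop_ge (cs : List Char) (interp : Bool) (j : Int) (h : (cs.length : Int) ≤ j) :
    pvStrLoop cs interp j = (cs.length : Int) := by
  rw [pvStrLoop.eq_def, dif_neg (by omega)]

theorem pvInterpLoop_stop (cs : List Char) (d j : Int)
    (h : ¬ (j < (cs.length : Int) ∧ 0 < d)) : pvInterpLoop cs d j = j := by
  rw [pvInterpLoop.eq_def, dif_neg h]

theorem pvGet_some (cs : List Char) (j : Int) (h0 : 0 ≤ j) (h1 : j < (cs.length : Int)) :
    PySem.List.pyGet? cs j = some (cs[j.toNat]'(by omega)) :=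
  PySem.List.pyGet?_eq_some_getElem cs h0 h1

-- ==== prefix characterizations used to line A's str.find up with B's scan ====

theorem pvPre1 (cs : List Char) (jn : Nat) (h : jn < cs.length) (c : Char) :
    ([c] <+: cs.drop jn) ↔ cs[jn] = c := by
  rw [List.drop_eq_getElem_cons h]
  constructor
  · intro hp; exact ((List.cons_prefix_cons.mp hp).1).symm
  · intro he; exact List.cons_prefix_cons.mpr ⟨he.symm, List.nil_prefix⟩

theorem pvPre2_pos (cs : List Char) (jn : Nat) (h : jn + 1 < cs.length) (c d : Char) :
    ([c, d] <+: cs.drop jn) ↔ (cs[jn]'(by omega) = c ∧ cs[jn + 1] = d) := by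
  rw [List.drop_eq_getElem_cons (by omega : jn < cs.length),
      List.drop_eq_getElem_cons (by omega : jn + 1 < cs.length)]
  constructor
  · intro hp
    obtain ⟨e1, hp2⟩ := List.cons_prefix_cons.mp hp
    obtain ⟨e2, _⟩ := List.cons_prefix_cons.mp hp2
    exact ⟨e1.symm, e2.symm⟩
  · rintro ⟨e1, e2⟩
    exact List.cons_prefix_cons.mpr ⟨e1.symm, List.cons_prefix_cons.mpr ⟨e2.symm, List.nil_prefix⟩⟩

theorem pvPre2_end (cs : List Char) (jn : Nat) (h : jn + 1 = cs.length) (c d : Char) :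
    ¬ ([c, d] <+: cs.drop jn) := by
  intro hp
  have := hp.length_le
  simp [List.length_drop] at this
  omega

-- ==== bounds for the two simple scans ====

theorem pvChar_bounds (cs : List Char) (j : Int) (hj : j ≤ (cs.length : Int)) :
    j ≤ pvCharLoop cs j ∧ pvCharLoop cs j ≤ (cs.length : Int) := by
  rw [pvCharLoop.eq_def]
  by_cases h : j < (cs.length : Int)
  · simp only [dif_pos h]
    split_ifs with h1 h2
    · by_cases h3 : j + 2 ≤ (cs.length : Int)
      · have := pvChar_bounds cs (j + 2) h3; omega
      · rw [pvCharLoop_ge cs (j + 2) (by omega)]; omega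
    · omega
    · have := pvChar_bounds cs (j + 1) (by omega); omega
  · rw [dif_neg h]; omega
termination_by ((cs.length : Int) - j).toNat
decreasing_by all_goals omega

theorem pvVerb_bounds (cs : List Char) (j : Int) (hj : j ≤ (cs.length : Int)) :
    j ≤ pvVerbLoop cs j ∧ pvVerbLoop cs j ≤ (cs.length : Int) := by
  rw [pvVerbLoop.eq_def]
  by_cases h : j < (cs.length : Int)
  · simp only [dif_pos h]
    split_ifs with h1 h2
    · have := pvVerb_bounds cs (j + 2) (by omega); omega
    · omega
    · have := pvVerb_bounds cs (j + 1) (by omega); omega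
  · rw [dif_neg h]; omega
termination_by ((cs.length : Int) - j).toNat
decreasing_by all_goals omega

-- ==== leaf simulations: B's context frames against A's dedicated loops ====

theorem pvSim_char (cs : List Char) (p b k j : Int) (s : List PvFrame) (hj0 : 0 ≤ j) :
    pvRun cs j p b k (PvFrame.ch :: s) = pvRun cs (pvCharLoop cs j) p b k s := by
  by_cases h : j < (cs.length : Int)
  · have hc := pvGet_some cs j hj0 h
    conv_lhs => rw [pvRun.eq_def]
    rw [pvCharLoop.eq_def]
    simp only [dif_pos h, hc, Option.some.injEq]
    split_ifs with h1 h2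
    · exact pvSim_char cs p b k (j + 2) s (by omega)
    · rfl
    · exact pvSim_char cs p b k (j + 1) s (by omega)
  · rw [pvRun_ge cs j p b k _ (by omega), pvCharLoop_ge cs j (by omega),
        pvRun_ge cs _ p b k s (by omega)]
termination_by ((cs.length : Int) - j).toNat
decreasing_by all_goals omega

theorem pvSim_verb (cs : List Char) (p b k j : Int) (s : List PvFrame) (hj0 : 0 ≤ j) :
    pvRun cs j p b k (PvFrame.vs :: s) = pvRun cs (pvVerbLoop cs j) p b k s := by
  by_cases h : j < (cs.length : Int)
  · have hc := pvGet_some cs j hj0 h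
    conv_lhs => rw [pvRun.eq_def]
    rw [pvVerbLoop.eq_def]
    simp only [dif_pos h, hc, Option.some.injEq]
    split_ifs with h1 h2
    · exact pvSim_verb cs p b k (j + 2) s (by omega)
    · rfl
    · exact pvSim_verb cs p b k (j + 1) s (by omega)
  · rw [pvRun_ge cs j p b k _ (by omega), pvVerbLoop_ge cs j (by omega),
        pvRun_ge cs _ p b k s (by omega)]
termination_by ((cs.length : Int) - j).toNat
decreasing_by all_goals omega

theorem pvSim_lc (cs : List Char) (p b k j : Int) (s : List PvFrame)
    (hj0 : 0 ≤ j) (hjn : j ≤ (cs.length : Int)) :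
    pvRun cs j p b k (PvFrame.lc :: s) =
      pvRun cs (if PySem.Chars.findFrom cs ['\n'] j = -1 then (cs.length : Int)
                else PySem.Chars.findFrom cs ['\n'] j) p b k s := by
  have hjcast : j = ((j.toNat : Nat) : Int) := by omega
  by_cases h : j < (cs.length : Int)
  · have hc := pvGet_some cs j hj0 h
    by_cases hnl : cs[j.toNat]'(by omega) = '\n'
    · have hff : PySem.Chars.findFrom cs ['\n'] j = j := by
        rw [hjcast]
        exact pvFF_here cs ['\n'] j.toNat (by omega)
          ((pvPre1 cs j.toNat (by omega) '\n').mpr hnl)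
      rw [hff, if_neg (by omega)]
      conv_lhs => rw [pvRun.eq_def]
      simp only [dif_pos h, hc, hnl, if_pos]
    · have hff : PySem.Chars.findFrom cs ['\n'] j = PySem.Chars.findFrom cs ['\n'] (j + 1) := by
        rw [hjcast]
        exact pvFF_step cs ['\n'] j.toNat (by omega)
          (fun hp => hnl ((pvPre1 cs j.toNat (by omega) '\n').mp hp))
      rw [hff]
      conv_lhs => rw [pvRun.eq_def]
      simp only [dif_pos h, hc, hnl]
      exact pvSim_lc cs p b k (j + 1) s (by omega) (by omega)
  · have hj : j = (cs.length : Int) := by omega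
    rw [hj, pvFF_past cs ['\n'] (by simp), if_pos rfl,
        pvRun_ge cs _ p b k _ (by omega), pvRun_ge cs _ p b k s (by omega)]
termination_by ((cs.length : Int) - j).toNat
decreasing_by all_goals omega

theorem pvSim_bc (cs : List Char) (p b k j : Int) (s : List PvFrame)
    (hj0 : 0 ≤ j) (hjn : j ≤ (cs.length : Int)) :
    pvRun cs j p b k (PvFrame.bc :: s) =
      pvRun cs (if PySem.Chars.findFrom cs ['*', '/'] j = -1 then (cs.length : Int)
                else PySem.Chars.findFrom cs ['*', '/'] j + 2) p b k s := by
  have hjcast : j = ((j.toNat : Nat) : Int) := by omega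
  by_cases h : j < (cs.length : Int)
  · have hc := pvGet_some cs j hj0 h
    by_cases hm : cs[j.toNat]'(by omega) = '*' ∧ j + 1 < (cs.length : Int) ∧
        PySem.List.pyGet? cs (j + 1) = some '/'
    · obtain ⟨hm1, hm2, hm3⟩ := id hm
      have hg2 : cs[j.toNat + 1]'(by omega) = '/' := by
        rw [pvGet_some cs (j + 1) (by omega) hm2] at hm3
        have he : (j + 1).toNat = j.toNat + 1 := by omega
        simp only [he] at hm3
        exact Option.some.inj hm3
      have hff : PySem.Chars.findFrom cs ['*', '/'] j = j := by
        rw [hjcast]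
        exact pvFF_here cs ['*', '/'] j.toNat (by omega)
          ((pvPre2_pos cs j.toNat (by omega) '*' '/').mpr ⟨hm1, hg2⟩)
      rw [hff, if_neg (by omega)]
      conv_lhs => rw [pvRun.eq_def]
      simp only [dif_pos h, hc]
      rw [if_pos ⟨hm.1, hm.2⟩]
    · have hnp : ¬ (['*', '/'] <+: cs.drop j.toNat) := by
        intro hp
        by_cases h2 : j.toNat + 1 < cs.length
        · rw [pvPre2_pos cs j.toNat h2 '*' '/'] at hp
          exact hm ⟨hp.1, by omega, by
            rw [pvGet_some cs (j + 1) (by omega) (by omega)]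
            have he : (j + 1).toNat = j.toNat + 1 := by omega
            simp only [he]
            exact congrArg some hp.2⟩
        · exact pvPre2_end cs j.toNat (by omega) '*' '/' hp
      have hff : PySem.Chars.findFrom cs ['*', '/'] j =
          PySem.Chars.findFrom cs ['*', '/'] (j + 1) := by
        rw [hjcast]
        exact pvFF_step cs ['*', '/'] j.toNat (by omega) hnp
      rw [hff]
      conv_lhs => rw [pvRun.eq_def]
      simp only [dif_pos h, hc]
      rw [if_neg hm]
      exact pvSim_bc cs p b k (j + 1) s (by omega) (by omega)
  · have hj : j = (cs.length : Int) := by omega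
    rw [hj, pvFF_past cs ['*', '/'] (by simp), if_pos rfl,
        pvRun_ge cs _ p b k _ (by omega), pvRun_ge cs _ p b k s (by omega)]
termination_by ((cs.length : Int) - j).toNat
decreasing_by all_goals omega

-- ==== controlled unfolding of pvSkip (its match carries a named hypothesis) ====

theorem pvSkip_eq (cs : List Char) (i : Int) (c : Char)
    (hc : PySem.List.pyGet? cs i = some c) :
    pvSkip cs i =
      (if c = '/' ∧ i + 1 < (cs.length : Int) ∧ PySem.List.pyGet? cs (i + 1) = some '/' then
        some (if PySem.Chars.findFrom cs ['\n'] i = -1 then (cs.length : Int)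
              else PySem.Chars.findFrom cs ['\n'] i)
      else if c = '/' ∧ i + 1 < (cs.length : Int) ∧ PySem.List.pyGet? cs (i + 1) = some '*' then
        some (if PySem.Chars.findFrom cs ['*', '/'] (i + 2) = -1 then (cs.length : Int)
              else PySem.Chars.findFrom cs ['*', '/'] (i + 2) + 2)
      else if c = '"' then
        if (0 < i ∧ PySem.List.pyGet? cs (i - 1) = some '@') ∨
           (2 ≤ i ∧ (PySem.List.slice cs (some (i - 2)) (some i) = ['@', '$'] ∨
                     PySem.List.slice cs (some (i - 2)) (some i) = ['$', '@'])) then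
          some (pvVerbLoop cs (i + 1))
        else
          some (pvStrLoop cs (decide (0 < i ∧ PySem.List.pyGet? cs (i - 1) = some '$')) (i + 1))
      else if c = '\'' then some (pvCharLoop cs (i + 1))
      else none) := by
  rw [pvSkip.eq_def]
  split <;> rename_i heq
  · rw [heq] at hc; cases hc
  · rw [heq] at hc
    injection hc with h
    subst h
    rfl

theorem pvSkip_eq_none (cs : List Char) (i : Int)
    (hc : PySem.List.pyGet? cs i = none) : pvSkip cs i = none := by
  rw [pvSkip.eq_def]
  split <;> rename_i heq
  · rfl
  · rw [heq] at hc; cases hc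

theorem pvSkip_lt (cs : List Char) (i : Int) (r : Int) (h : pvSkip cs i = some r) :
    i < (cs.length : Int) := by
  by_contra hn
  rw [pvSkip_eq_none cs i ((PySem.List.pyGet?_eq_none_iff cs i).mpr (fun hr => hn hr.2))] at h
  cases h

-- first-occurrence facts packaged for the bounds proofs
theorem pvFF_lb_ub (s sub : List Char) (k : Nat) (hs : sub ≠ []) (hk : k ≤ s.length)
    (hne : PySem.Chars.findFrom s sub (k : Int) ≠ -1) :
    (k : Int) ≤ PySem.Chars.findFrom s sub (k : Int) ∧
    (PySem.Chars.findFrom s sub (k : Int)).toNat + sub.length ≤ s.length ∧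
    sub <+: s.drop (PySem.Chars.findFrom s sub (k : Int)).toNat := by
  obtain ⟨h1, h2, h3⟩ := PySem.Chars.findFrom_natCast_spec s sub k hk hne
  refine ⟨h1, ?_, h2⟩
  have := h2.length_le
  rw [List.length_drop] at this
  have hpos : 0 < sub.length := List.length_pos_of_ne_nil hs
  omega

-- ==== bounds: every scan only moves forward and never past the end ====

theorem pvBounds (cs : List Char) (m : Nat) :
    (∀ i r : Int, ((cs.length : Int) - i).toNat ≤ m → 0 ≤ i → pvSkip cs i = some r →
        i < r ∧ r ≤ (cs.length : Int))
  ∧ (∀ (interp : Bool) (j : Int), ((cs.length : Int) - j).toNat ≤ m → 0 ≤ j →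
        j ≤ (cs.length : Int) →
        j ≤ pvStrLoop cs interp j ∧ pvStrLoop cs interp j ≤ (cs.length : Int))
  ∧ (∀ d j : Int, ((cs.length : Int) - j).toNat ≤ m → 0 ≤ j → j ≤ (cs.length : Int) →
        j ≤ pvInterpLoop cs d j ∧ pvInterpLoop cs d j ≤ (cs.length : Int)) := by
  induction m using Nat.strong_induction_on with
  | _ m IH =>
  have hskip : ∀ i r : Int, ((cs.length : Int) - i).toNat ≤ m → 0 ≤ i → pvSkip cs i = some r →
      i < r ∧ r ≤ (cs.length : Int) := by
    intro i r hm hi0 hsk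
    have hi_lt : i < (cs.length : Int) := pvSkip_lt cs i r hsk
    obtain ⟨c0, hc⟩ : ∃ c, PySem.List.pyGet? cs i = some c := ⟨_, pvGet_some cs i hi0 hi_lt⟩
    rw [pvSkip_eq cs i c0 hc] at hsk
    have hi2 : i = ((i.toNat : Nat) : Int) := by omega
    have hgl : cs[i.toNat]'(by omega) = c0 := by
      have h := pvGet_some cs i hi0 hi_lt
      rw [hc] at h
      exact (Option.some.inj h).symm
    by_cases h1 : c0 = '/' ∧ i + 1 < (cs.length : Int) ∧ PySem.List.pyGet? cs (i + 1) = some '/'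
    · rw [if_pos h1] at hsk
      injection hsk with hr
      subst hr
      by_cases hnl : PySem.Chars.findFrom cs ['\n'] i = -1
      · rw [if_pos hnl]; omega
      · rw [if_neg hnl]
        rw [hi2] at hnl ⊢
        obtain ⟨hl, hu, hp⟩ := pvFF_lb_ub cs ['\n'] i.toNat (by simp) (by omega) hnl
        have hlen : (PySem.Chars.findFrom cs ['\n'] ((i.toNat : Nat) : Int)).toNat < cs.length := by
          simp only [List.length_cons, List.length_nil] at hu; omega
        have hch := (pvPre1 cs _ hlen '\n').mp hp
        have hne2 : PySem.Chars.findFrom cs ['\n'] ((i.toNat : Nat) : Int) ≠ ((i.toNat : Nat) : Int) := by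
          intro he
          simp only [he, Int.toNat_natCast] at hch
          rw [hch] at hgl
          rw [← hgl] at h1
          simp at h1
        simp only [List.length_cons, List.length_nil] at hu
        omega
    · rw [if_neg h1] at hsk
      by_cases h2 : c0 = '/' ∧ i + 1 < (cs.length : Int) ∧ PySem.List.pyGet? cs (i + 1) = some '*'
      · rw [if_pos h2] at hsk
        injection hsk with hr
        subst hr
        have hi22 : i + 2 = (((i + 2).toNat : Nat) : Int) := by omega
        by_cases he : PySem.Chars.findFrom cs ['*', '/'] (i + 2) = -1
        · rw [if_pos he]; omega
        · rw [if_neg he]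
          rw [hi22] at he ⊢
          obtain ⟨hl, hu, hp⟩ := pvFF_lb_ub cs ['*', '/'] (i + 2).toNat (by simp) (by omega) he
          simp only [List.length_cons, List.length_nil] at hu
          omega
      · rw [if_neg h2] at hsk
        by_cases h3 : c0 = '"'
        · rw [if_pos h3] at hsk
          by_cases h4 : (0 < i ∧ PySem.List.pyGet? cs (i - 1) = some '@') ∨
              (2 ≤ i ∧ (PySem.List.slice cs (some (i - 2)) (some i) = ['@', '$'] ∨
                        PySem.List.slice cs (some (i - 2)) (some i) = ['$', '@']))
          · rw [if_pos h4] at hsk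
            injection hsk with hr
            subst hr
            have := pvVerb_bounds cs (i + 1) (by omega)
            omega
          · rw [if_neg h4] at hsk
            injection hsk with hr
            subst hr
            have hm1 : m - 1 < m := by omega
            have := ((IH (m - 1) hm1).2.1)
              (decide (0 < i ∧ PySem.List.pyGet? cs (i - 1) = some '$'))
              (i + 1) (by omega) (by omega) (by omega)
            omega
        · rw [if_neg h3] at hsk
          by_cases h5 : c0 = '\''
          · rw [if_pos h5] at hsk
            injection hsk with hr
            subst hr
            have := pvChar_bounds cs (i + 1) (by omega)
            omega
          · rw [if_neg h5] at hsk
            cases hsk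
  have hstr : ∀ (interp : Bool) (j : Int), ((cs.length : Int) - j).toNat ≤ m → 0 ≤ j →
      j ≤ (cs.length : Int) →
      j ≤ pvStrLoop cs interp j ∧ pvStrLoop cs interp j ≤ (cs.length : Int) := by
    intro interp j hm hj0 hjn
    rw [pvStrLoop.eq_def]
    by_cases h : j < (cs.length : Int)
    · simp only [dif_pos h]
      have hm1 : m - 1 < m := by omega
      split_ifs with h1 h2
      · by_cases h4 : j + 2 ≤ (cs.length : Int)
        · have := (IH (m - 1) hm1).2.1 interp (j + 2) (by omega) (by omega) h4
          omega
        · rw [pvStrLoop_ge cs interp (j + 2) (by omega)]; omega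
      · have hb := (IH (m - 1) hm1).2.2 1 (j + 1) (by omega) (by omega) (by omega)
        rw [max_eq_left (by omega)]
        have := (IH (m - 1) hm1).2.1 interp (pvInterpLoop cs 1 (j + 1)) (by omega) (by omega)
          (by omega)
        omega
      · omega
      · have := (IH (m - 1) hm1).2.1 interp (j + 1) (by omega) (by omega) (by omega)
        omega
    · rw [dif_neg h]; omega
  have hitp : ∀ d j : Int, ((cs.length : Int) - j).toNat ≤ m → 0 ≤ j →
      j ≤ (cs.length : Int) →
      j ≤ pvInterpLoop cs d j ∧ pvInterpLoop cs d j ≤ (cs.length : Int) := by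
    intro d j hm hj0 hjn
    rw [pvInterpLoop.eq_def]
    by_cases h : j < (cs.length : Int) ∧ 0 < d
    · simp only [dif_pos h]
      have hm1 : m - 1 < m := by omega
      cases hsk : pvSkip cs j with
      | some r =>
        have hb := hskip j r (by omega) hj0 hsk
        dsimp only
        rw [max_eq_left (by omega)]
        have := (IH (m - 1) hm1).2.2 d r (by omega) (by omega) (by omega)
        omega
      | none =>
        dsimp only
        split_ifs with h1 h2
        · have := (IH (m - 1) hm1).2.2 (d + 1) (j + 1) (by omega) (by omega) (by omega); omega
        · have := (IH (m - 1) hm1).2.2 (d - 1) (j + 1) (by omega) (by omega) (by omega); omega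
        · have := (IH (m - 1) hm1).2.2 d (j + 1) (by omega) (by omega) (by omega); omega
    · rw [dif_neg h]; omega
  exact ⟨hskip, hstr, hitp⟩

theorem pvSkip_bounds (cs : List Char) (i r : Int) (hi0 : 0 ≤ i) (h : pvSkip cs i = some r) :
    i < r ∧ r ≤ (cs.length : Int) :=
  (pvBounds cs ((cs.length : Int) - i).toNat).1 i r le_rfl hi0 h

theorem pvItp_bounds (cs : List Char) (d j : Int) (hj0 : 0 ≤ j)
    (hjn : j ≤ (cs.length : Int)) :
    j ≤ pvInterpLoop cs d j ∧ pvInterpLoop cs d j ≤ (cs.length : Int) :=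
  (pvBounds cs ((cs.length : Int) - j).toNat).2.2 d j le_rfl hj0 hjn

-- ==== one controlled unfolding of pvRun in a detection context ([] or interpolation hole) ====

theorem pvRun_detect (cs : List Char) (i p b k : Int) (s : List PvFrame)
    (hdet : s = [] ∨ ∃ d t, s = PvFrame.itp d :: t)
    (h : i < (cs.length : Int)) (c0 : Char) (hc : PySem.List.pyGet? cs i = some c0) :
    pvRun cs i p b k s =
      (if c0 = '/' ∧ i + 1 < (cs.length : Int) ∧ PySem.List.pyGet? cs (i + 1) = some '/' then
        pvRun cs (i + 2) p b k (PvFrame.lc :: s)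
      else if c0 = '/' ∧ i + 1 < (cs.length : Int) ∧ PySem.List.pyGet? cs (i + 1) = some '*' then
        pvRun cs (i + 2) p b k (PvFrame.bc :: s)
      else if c0 = '"' then
        if (0 < i ∧ PySem.List.pyGet? cs (i - 1) = some '@') ∨
           (2 ≤ i ∧ (PySem.List.slice cs (some (i - 2)) (some i) = ['@', '$'] ∨
                     PySem.List.slice cs (some (i - 2)) (some i) = ['$', '@'])) then
          pvRun cs (i + 1) p b k (PvFrame.vs :: s)
        else
          pvRun cs (i + 1) p b k
            (PvFrame.st (decide (0 < i ∧ PySem.List.pyGet? cs (i - 1) = some '$')) :: s)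
      else if c0 = '\'' then
        pvRun cs (i + 1) p b k (PvFrame.ch :: s)
      else
        match s with
        | PvFrame.itp d :: t =>
          if c0 = '{' then pvRun cs (i + 1) p b k (PvFrame.itp (d + 1) :: t)
          else if c0 = '}' then
            if d = 1 then pvRun cs (i + 1) p b k t
            else pvRun cs (i + 1) p b k (PvFrame.itp (d - 1) :: t)
          else pvRun cs (i + 1) p b k (PvFrame.itp d :: t)
        | _ =>
          if c0 = '(' then pvRun cs (i + 1) (p + 1) b k s
          else if c0 = ')' then pvRun cs (i + 1) (p - 1) b k s
          else if c0 = '{' then pvRun cs (i + 1) p (b + 1) k s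
          else if c0 = '}' then pvRun cs (i + 1) p (b - 1) k s
          else if c0 = '[' then pvRun cs (i + 1) p b (k + 1) s
          else if c0 = ']' then pvRun cs (i + 1) p b (k - 1) s
          else if c0 = ';' ∧ p = 0 ∧ b = 0 ∧ k = 0 then i
          else pvRun cs (i + 1) p b k s) := by
  rcases hdet with rfl | ⟨d, t, rfl⟩ <;>
    · conv_lhs => rw [pvRun.eq_def]
      simp only [dif_pos h, hc]

-- ==== the simulation: the indexed stack machine runs A's skipper step for step ====

theorem pvSim (cs : List Char) (m : Nat) :
    (∀ i r : Int, ((cs.length : Int) - i).toNat ≤ m → 0 ≤ i → pvSkip cs i = some r →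
      ∀ p b k : Int, ∀ s : List PvFrame, (s = [] ∨ ∃ d t, s = PvFrame.itp d :: t) →
        pvRun cs i p b k s = pvRun cs r p b k s)
  ∧ (∀ (interp : Bool) (j : Int), ((cs.length : Int) - j).toNat ≤ m → 0 ≤ j →
      j ≤ (cs.length : Int) → ∀ p b k : Int, ∀ s : List PvFrame,
        pvRun cs j p b k (PvFrame.st interp :: s) = pvRun cs (pvStrLoop cs interp j) p b k s)
  ∧ (∀ d j : Int, ((cs.length : Int) - j).toNat ≤ m → 0 ≤ j → j ≤ (cs.length : Int) → 1 ≤ d →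
      ∀ p b k : Int, ∀ s : List PvFrame,
        pvRun cs j p b k (PvFrame.itp d :: s) = pvRun cs (pvInterpLoop cs d j) p b k s) := by
  induction m using Nat.strong_induction_on with
  | _ m IH =>
  have hskipS : ∀ i r : Int, ((cs.length : Int) - i).toNat ≤ m → 0 ≤ i → pvSkip cs i = some r →
      ∀ p b k : Int, ∀ s : List PvFrame, (s = [] ∨ ∃ d t, s = PvFrame.itp d :: t) →
        pvRun cs i p b k s = pvRun cs r p b k s := by
    intro i r hm hi0 hsk p b k s hdet
    have hi_lt : i < (cs.length : Int) := pvSkip_lt cs i r hsk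
    have hm1 : m - 1 < m := by omega
    obtain ⟨c0, hc⟩ : ∃ c, PySem.List.pyGet? cs i = some c := ⟨_, pvGet_some cs i hi0 hi_lt⟩
    have hgl : cs[i.toNat]'(by omega) = c0 := by
      have h := pvGet_some cs i hi0 hi_lt
      rw [hc] at h
      exact (Option.some.inj h).symm
    have hi2 : i = ((i.toNat : Nat) : Int) := by omega
    rw [pvSkip_eq cs i c0 hc] at hsk
    rw [pvRun_detect cs i p b k s hdet hi_lt c0 hc]
    by_cases h1 : c0 = '/' ∧ i + 1 < (cs.length : Int) ∧ PySem.List.pyGet? cs (i + 1) = some '/'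
    · rw [if_pos h1] at hsk ⊢
      injection hsk with hr
      subst hr
      have hg1 : cs[i.toNat + 1]'(by omega) = '/' := by
        have h := pvGet_some cs (i + 1) (by omega) h1.2.1
        have h2 := h1.2.2
        rw [h] at h2
        have he : (i + 1).toNat = i.toNat + 1 := by omega
        simp only [he] at h2
        exact Option.some.inj h2
      have e1 : PySem.Chars.findFrom cs ['\n'] i = PySem.Chars.findFrom cs ['\n'] (i + 1) := by
        rw [hi2, show ((i.toNat : Nat) : Int) + 1 = i + 1 from by omega]
        rw [show i + 1 = ((i.toNat + 1 : Nat) : Int) from by omega]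
        exact pvFF_step cs ['\n'] i.toNat (by omega)
          (fun hp => by
            have := (pvPre1 cs i.toNat (by omega) '\n').mp hp
            rw [this] at hgl
            rw [← hgl] at h1
            simp at h1)
      have e2 : PySem.Chars.findFrom cs ['\n'] (i + 1) = PySem.Chars.findFrom cs ['\n'] (i + 2) := by
        rw [show i + 1 = ((i.toNat + 1 : Nat) : Int) from by omega,
            show i + 2 = ((i.toNat + 1 : Nat) : Int) + 1 from by omega]
        exact pvFF_step cs ['\n'] (i.toNat + 1) (by omega)
          (fun hp => by
            have := (pvPre1 cs (i.toNat + 1) (by omega) '\n').mp hp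
            rw [this] at hg1
            cases hg1)
      rw [pvSim_lc cs p b k (i + 2) s (by omega) (by omega), ← e2, ← e1]
    · rw [if_neg h1] at hsk ⊢
      by_cases h2 : c0 = '/' ∧ i + 1 < (cs.length : Int) ∧ PySem.List.pyGet? cs (i + 1) = some '*'
      · rw [if_pos h2] at hsk ⊢
        injection hsk with hr
        subst hr
        exact pvSim_bc cs p b k (i + 2) s (by omega) (by omega)
      · rw [if_neg h2] at hsk ⊢
        by_cases h3 : c0 = '"'
        · rw [if_pos h3] at hsk ⊢
          by_cases h4 : (0 < i ∧ PySem.List.pyGet? cs (i - 1) = some '@') ∨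
              (2 ≤ i ∧ (PySem.List.slice cs (some (i - 2)) (some i) = ['@', '$'] ∨
                        PySem.List.slice cs (some (i - 2)) (some i) = ['$', '@']))
          · rw [if_pos h4] at hsk ⊢
            injection hsk with hr
            subst hr
            exact pvSim_verb cs p b k (i + 1) s (by omega)
          · rw [if_neg h4] at hsk ⊢
            injection hsk with hr
            subst hr
            exact (IH (m - 1) hm1).2.1 _ (i + 1) (by omega) (by omega) (by omega) p b k s
        · rw [if_neg h3] at hsk ⊢
          by_cases h5 : c0 = '\''
          · rw [if_pos h5] at hsk ⊢
            injection hsk with hr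
            subst hr
            exact pvSim_char cs p b k (i + 1) s (by omega)
          · rw [if_neg h5] at hsk
            cases hsk
  have hstrS : ∀ (interp : Bool) (j : Int), ((cs.length : Int) - j).toNat ≤ m → 0 ≤ j →
      j ≤ (cs.length : Int) → ∀ p b k : Int, ∀ s : List PvFrame,
        pvRun cs j p b k (PvFrame.st interp :: s) = pvRun cs (pvStrLoop cs interp j) p b k s := by
    intro interp j hm hj0 hjn p b k s
    by_cases h : j < (cs.length : Int)
    · have hm1 : m - 1 < m := by omega
      obtain ⟨c0, hc⟩ : ∃ c, PySem.List.pyGet? cs j = some c := ⟨_, pvGet_some cs j hj0 h⟩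
      conv_lhs => rw [pvRun.eq_def]
      rw [pvStrLoop.eq_def]
      simp only [dif_pos h, hc, Option.some.injEq]
      by_cases h1 : c0 = '\\'
      · rw [if_pos h1, if_pos h1]
        by_cases h4 : j + 2 ≤ (cs.length : Int)
        · exact (IH (m - 1) hm1).2.1 interp (j + 2) (by omega) (by omega) h4 p b k s
        · rw [pvStrLoop_ge cs interp (j + 2) (by omega),
              pvRun_ge cs (j + 2) p b k _ (by omega),
              pvRun_ge cs _ p b k s (by omega)]
      · rw [if_neg h1, if_neg h1]
        by_cases h2 : interp = true ∧ c0 = '{' ∧ j + 1 < (cs.length : Int) ∧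
            PySem.List.pyGet? cs (j + 1) ≠ some '{'
        · rw [if_pos h2, if_pos h2]
          have hb := pvItp_bounds cs 1 (j + 1) (by omega) (by omega)
          rw [max_eq_left (by omega)]
          rw [(IH (m - 1) hm1).2.2 1 (j + 1) (by omega) (by omega) (by omega) (by omega)
            p b k (PvFrame.st interp :: s)]
          exact (IH (m - 1) hm1).2.1 interp (pvInterpLoop cs 1 (j + 1)) (by omega) (by omega)
            (by omega) p b k s
        · rw [if_neg h2, if_neg h2]
          by_cases h3 : c0 = '"'
          · rw [if_pos h3, if_pos h3]
          · rw [if_neg h3, if_neg h3]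
            exact (IH (m - 1) hm1).2.1 interp (j + 1) (by omega) (by omega) (by omega) p b k s
    · rw [pvStrLoop_ge cs interp j (by omega), pvRun_ge cs j p b k _ (by omega),
          pvRun_ge cs _ p b k s (by omega)]
  have hitpS : ∀ d j : Int, ((cs.length : Int) - j).toNat ≤ m → 0 ≤ j → j ≤ (cs.length : Int) →
      1 ≤ d → ∀ p b k : Int, ∀ s : List PvFrame,
        pvRun cs j p b k (PvFrame.itp d :: s) = pvRun cs (pvInterpLoop cs d j) p b k s := by
    intro d j hm hj0 hjn hd p b k s
    by_cases h : j < (cs.length : Int)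
    · have hm1 : m - 1 < m := by omega
      obtain ⟨c0, hc⟩ : ∃ c, PySem.List.pyGet? cs j = some c := ⟨_, pvGet_some cs j hj0 h⟩
      rw [pvInterpLoop.eq_def]
      simp only [dif_pos (show j < (cs.length : Int) ∧ 0 < d from ⟨h, by omega⟩)]
      cases hsk : pvSkip cs j with
      | some r =>
        dsimp only
        obtain ⟨hr1, hr2⟩ := pvSkip_bounds cs j r hj0 hsk
        rw [max_eq_left (by omega)]
        rw [hskipS j r (by omega) hj0 hsk p b k (PvFrame.itp d :: s) (Or.inr ⟨d, s, rfl⟩)]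
        exact (IH (m - 1) hm1).2.2 d r (by omega) (by omega) (by omega) hd p b k s
      | none =>
        dsimp only
        rw [pvSkip_eq cs j c0 hc] at hsk
        have hn1 : ¬ (c0 = '/' ∧ j + 1 < (cs.length : Int) ∧
            PySem.List.pyGet? cs (j + 1) = some '/') := by
          intro hx; rw [if_pos hx] at hsk; cases hsk
        rw [if_neg hn1] at hsk
        have hn2 : ¬ (c0 = '/' ∧ j + 1 < (cs.length : Int) ∧
            PySem.List.pyGet? cs (j + 1) = some '*') := by
          intro hx; rw [if_pos hx] at hsk; cases hsk
        rw [if_neg hn2] at hsk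
        have hn3 : ¬ (c0 = '"') := by
          intro hx; rw [if_pos hx] at hsk; split_ifs at hsk <;> simp at hsk
        rw [if_neg hn3] at hsk
        have hn5 : ¬ (c0 = '\'') := by
          intro hx; rw [if_pos hx] at hsk; cases hsk
        rw [pvRun_detect cs j p b k (PvFrame.itp d :: s) (Or.inr ⟨d, s, rfl⟩) h c0 hc,
            if_neg hn1, if_neg hn2, if_neg hn3, if_neg hn5]
        simp only [hc, Option.some.injEq]
        by_cases hb1 : c0 = '{'
        · rw [if_pos hb1, if_pos hb1]
          exact (IH (m - 1) hm1).2.2 (d + 1) (j + 1) (by omega) (by omega) (by omega) (by omega)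
            p b k s
        · rw [if_neg hb1, if_neg hb1]
          by_cases hb2 : c0 = '}'
          · rw [if_pos hb2, if_pos hb2]
            by_cases hd1 : d = 1
            · rw [if_pos hd1, hd1]
              rw [pvInterpLoop_stop cs (1 - 1) (j + 1) (by simp)]
            · rw [if_neg hd1]
              exact (IH (m - 1) hm1).2.2 (d - 1) (j + 1) (by omega) (by omega) (by omega)
                (by omega) p b k s
          · rw [if_neg hb2, if_neg hb2]
            exact (IH (m - 1) hm1).2.2 d (j + 1) (by omega) (by omega) (by omega) (by omega)
              p b k s
    · rw [pvInterpLoop_stop cs d j (by omega), pvRun_ge cs j p b k _ (by omega),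
          pvRun_ge cs j p b k s (by omega)]
  exact ⟨hskipS, hstrS, hitpS⟩

-- ==== the main loops agree: A's loop against the indexed stack machine ====

theorem pvTop (cs : List Char) (i p b k : Int) (hi0 : 0 ≤ i) :
    pvFindLoop cs i p b k = pvRun cs i p b k [] := by
  by_cases h : i < (cs.length : Int)
  · obtain ⟨c0, hc⟩ : ∃ c, PySem.List.pyGet? cs i = some c := ⟨_, pvGet_some cs i hi0 h⟩
    rw [pvFindLoop.eq_def]
    simp only [dif_pos h]
    cases hsk : pvSkip cs i with
    | some r =>
      dsimp only
      obtain ⟨hr1, hr2⟩ := pvSkip_bounds cs i r hi0 hsk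
      rw [max_eq_left (by omega)]
      rw [pvTop cs r p b k (by omega)]
      exact ((pvSim cs ((cs.length : Int) - i).toNat).1 i r le_rfl hi0 hsk p b k []
        (Or.inl rfl)).symm
    | none =>
      dsimp only
      rw [hc]
      dsimp only
      rw [pvSkip_eq cs i c0 hc] at hsk
      have hn1 : ¬ (c0 = '/' ∧ i + 1 < (cs.length : Int) ∧
          PySem.List.pyGet? cs (i + 1) = some '/') := by
        intro hx; rw [if_pos hx] at hsk; cases hsk
      rw [if_neg hn1] at hsk
      have hn2 : ¬ (c0 = '/' ∧ i + 1 < (cs.length : Int) ∧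
          PySem.List.pyGet? cs (i + 1) = some '*') := by
        intro hx; rw [if_pos hx] at hsk; cases hsk
      rw [if_neg hn2] at hsk
      have hn3 : ¬ (c0 = '"') := by
        intro hx; rw [if_pos hx] at hsk; split_ifs at hsk <;> simp at hsk
      rw [if_neg hn3] at hsk
      have hn5 : ¬ (c0 = '\'') := by
        intro hx; rw [if_pos hx] at hsk; cases hsk
      rw [pvRun_detect cs i p b k [] (Or.inl rfl) h c0 hc,
          if_neg hn1, if_neg hn2, if_neg hn3, if_neg hn5]
      split_ifs <;> first
        | rfl
        | exact pvTop cs (i + 1) _ _ _ (by omega)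
  · rw [pvFindLoop.eq_def, dif_neg h, pvRun_ge cs i p b k [] (by omega)]
termination_by ((cs.length : Int) - i).toNat
decreasing_by all_goals omega

-- ==== conversions between index-based and suffix-based access ====

theorem pvGetNat (cs : List Char) (j : Int) (hj : 0 ≤ j) :
    PySem.List.pyGet? cs j = cs[j.toNat]? := by
  have h : j = ((j.toNat : Nat) : Int) := by omega
  rw [h, PySem.List.pyGet?_natCast]
  congr 1

theorem pvCondIff (cs : List Char) (j : Int) (hj : 0 ≤ j) (x : Char) :
    (j < (cs.length : Int) ∧ PySem.List.pyGet? cs j = some x) ↔ cs[j.toNat]? = some x := by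
  rw [pvGetNat cs j hj]
  constructor
  · exact fun h => h.2
  · intro h
    obtain ⟨hlt, -⟩ := List.getElem?_eq_some_iff.mp h
    exact ⟨by omega, h⟩

theorem pvPrevAt_succ (cs : List Char) (j : Int) (hj : 0 ≤ j) :
    pvPrevAt cs (j + 1) = PySem.List.pyGet? cs j := by
  unfold pvPrevAt
  rw [if_pos (by omega)]
  norm_num

theorem pvPrevAt_some (cs : List Char) (i : Int) (x : Char) :
    pvPrevAt cs i = some x ↔ (0 < i ∧ PySem.List.pyGet? cs (i - 1) = some x) := by
  unfold pvPrevAt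
  by_cases h : 1 ≤ i
  · rw [if_pos h]
    exact ⟨fun hh => ⟨by omega, hh⟩, fun hh => hh.2⟩
  · rw [if_neg h]
    constructor
    · intro hh
      cases hh
    · intro hh
      exact absurd hh.1 (by omega)

theorem pvSliceTwo (cs : List Char) (i : Int) (h2 : 2 ≤ i) (hlt : i < (cs.length : Int))
    (x y : Char) :
    (PySem.List.slice cs (some (i - 2)) (some i) = [x, y]) ↔
      (PySem.List.pyGet? cs (i - 2) = some x ∧ PySem.List.pyGet? cs (i - 1) = some y) := by
  have hd2 : i.toNat - 2 < cs.length := by omega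
  have hd1 : i.toNat - 2 + 1 < cs.length := by omega
  have hs : PySem.List.slice cs (some (i - 2)) (some i) =
      (cs.drop (i.toNat - 2)).take (i.toNat - (i.toNat - 2)) := by
    rw [show i - 2 = ((i.toNat - 2 : Nat) : Int) from by omega]
    conv_lhs => rw [show i = ((i.toNat : Nat) : Int) from by omega]
    rw [PySem.List.slice_natCast, Int.toNat_natCast]
  rw [hs, show i.toNat - (i.toNat - 2) = 2 from by omega,
      List.drop_eq_getElem_cons hd2, List.drop_eq_getElem_cons hd1,
      pvGetNat cs (i - 2) (by omega), pvGetNat cs (i - 1) (by omega),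
      show (i - 2).toNat = i.toNat - 2 from by omega,
      show (i - 1).toNat = i.toNat - 2 + 1 from by omega,
      List.getElem?_eq_getElem hd2, List.getElem?_eq_getElem hd1]
  simp [List.take]

theorem pvVerbIff (cs : List Char) (i : Int) (hi : 0 ≤ i) (hlt : i < (cs.length : Int)) :
    ((0 < i ∧ PySem.List.pyGet? cs (i - 1) = some '@') ∨
     (2 ≤ i ∧ (PySem.List.slice cs (some (i - 2)) (some i) = ['@', '$'] ∨
               PySem.List.slice cs (some (i - 2)) (some i) = ['$', '@'])))
    ↔ (pvPrevAt cs i = some '@' ∨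
       (pvPrevAt cs (i - 1) = some '@' ∧ pvPrevAt cs i = some '$') ∨
       (pvPrevAt cs (i - 1) = some '$' ∧ pvPrevAt cs i = some '@')) := by
  rw [pvPrevAt_some cs i '@', pvPrevAt_some cs (i - 1) '@', pvPrevAt_some cs i '$',
      pvPrevAt_some cs (i - 1) '$', show i - 1 - 1 = i - 2 from by ring]
  by_cases h2 : 2 ≤ i
  · rw [pvSliceTwo cs i h2 hlt '@' '$', pvSliceTwo cs i h2 hlt '$' '@']
    have ha : 0 < i := by omega
    have hb : 0 < i - 1 := by omega
    constructor
    · rintro (h | ⟨-, (⟨u, v⟩ | ⟨u, v⟩)⟩)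
      · exact Or.inl h
      · exact Or.inr (Or.inl ⟨⟨hb, u⟩, ⟨ha, v⟩⟩)
      · exact Or.inr (Or.inr ⟨⟨hb, u⟩, ⟨ha, v⟩⟩)
    · rintro (h | ⟨⟨-, u⟩, ⟨-, v⟩⟩ | ⟨⟨-, u⟩, ⟨-, v⟩⟩)
      · exact Or.inl h
      · exact Or.inr ⟨h2, Or.inl ⟨u, v⟩⟩
      · exact Or.inr ⟨h2, Or.inr ⟨u, v⟩⟩
  · have hb : ¬ (1 < i) := by omega
    simp [h2, hb]

theorem pvFlagEq (cs : List Char) (i : Int) :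
    decide (pvPrevAt cs i = some '$') =
      decide (0 < i ∧ PySem.List.pyGet? cs (i - 1) = some '$') :=
  decide_eq_decide.mpr (pvPrevAt_some cs i '$')

theorem pvBraceIff (cs : List Char) (i : Int) (tl : List Char) (hi : 0 ≤ i)
    (hhead : tl.head? = cs[i.toNat + 1]?) :
    (tl.head?.any (fun c2 => c2 != '{') = true) ↔
      (i + 1 < (cs.length : Int) ∧ PySem.List.pyGet? cs (i + 1) ≠ some '{') := by
  have hg : PySem.List.pyGet? cs (i + 1) = cs[i.toNat + 1]? := by
    rw [pvGetNat cs (i + 1) (by omega)]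
    congr 1
    omega
  rw [hhead, hg]
  cases hx : cs[i.toNat + 1]? with
  | none =>
    have : ¬ (i.toNat + 1 < cs.length) := by
      intro hlt
      rw [List.getElem?_eq_getElem hlt] at hx
      cases hx
    simp [Option.any]
    omega
  | some c2 =>
    obtain ⟨hlt, -⟩ := List.getElem?_eq_some_iff.mp hx
    simp only [Option.any, bne_iff_ne]
    constructor
    · intro hne
      exact ⟨by omega, fun he => hne (Option.some.inj he)⟩
    · intro h he
      exact h.2 (congrArg some he)

-- ==== the bridge: B's streaming port equals the indexed stack machine ====

theorem pvBridge (cs : List Char) (i p b k : Int) (s : List PvFrame) (hi : 0 ≤ i) :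
    pvStep (cs.drop i.toNat) i (pvPrevAt cs (i - 1)) (pvPrevAt cs i) p b k s
      = pvRun cs i p b k s := by
  cases hrest : cs.drop i.toNat with
  | nil =>
    have hlen : (cs.length : Int) ≤ i := by
      have := congrArg List.length hrest
      simp [List.length_drop] at this
      omega
    simp only [pvStep]
    rw [pvRun_ge cs i p b k s hlen]
  | cons c tl =>
    have hlt : i.toNat < cs.length := by
      have := congrArg List.length hrest
      simp [List.length_drop] at this
      omega
    have hilt : i < (cs.length : Int) := by omega
    have hc : PySem.List.pyGet? cs i = some c := by
      rw [pvGetNat cs i hi, ← List.head?_drop, hrest]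
      rfl
    have htl : tl = cs.drop (i.toNat + 1) := by
      have h : (cs.drop i.toNat).tail = cs.drop (i.toNat + 1) := by
        simp [List.tail_drop]
      rw [hrest] at h
      exact h
    have hhead : tl.head? = cs[i.toNat + 1]? := by
      rw [htl, List.head?_drop]
    have hla : ∀ x : Char, (tl.head? = some x) ↔
        (i + 1 < (cs.length : Int) ∧ PySem.List.pyGet? cs (i + 1) = some x) := by
      intro x
      rw [hhead, show i.toNat + 1 = (i + 1).toNat from by omega]
      exact (pvCondIff cs (i + 1) (by omega) x).symm
    have hAdv1 : ∀ p' b' k' : Int, ∀ s' : List PvFrame,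
        pvStep tl (i + 1) (pvPrevAt cs i) (some c) p' b' k' s' = pvRun cs (i + 1) p' b' k' s' := by
      intro p' b' k' s'
      have e1 : tl = cs.drop (i + 1).toNat := by rw [htl]; congr 1; omega
      have e2 : pvPrevAt cs i = pvPrevAt cs (i + 1 - 1) := by norm_num
      have e3 : (some c : Option Char) = pvPrevAt cs (i + 1) := by
        rw [pvPrevAt_succ cs i hi, hc]
      rw [e1, e2, e3]
      exact pvBridge cs (i + 1) p' b' k' s' (by omega)
    have hAdv2 : ∀ p' b' k' : Int, ∀ s' : List PvFrame,
        pvStep tl.tail (i + 2) (some c) tl.head? p' b' k' s' = pvRun cs (i + 2) p' b' k' s' := by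
      intro p' b' k' s'
      have e1 : tl.tail = cs.drop (i + 2).toNat := by
        rw [htl, List.tail_drop]
        congr 1
        omega
      have e2 : (some c : Option Char) = pvPrevAt cs (i + 2 - 1) := by
        rw [show i + 2 - 1 = i + 1 from by ring, pvPrevAt_succ cs i hi, hc]
      have e3 : tl.head? = pvPrevAt cs (i + 2) := by
        rw [show i + 2 = (i + 1) + 1 from by ring, pvPrevAt_succ cs (i + 1) (by omega),
            pvGetNat cs (i + 1) (by omega), hhead]
        congr 1
        omega
      rw [e1, e2, e3]
      exact pvBridge cs (i + 2) p' b' k' s' (by omega)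
    cases s with
    | nil =>
      rw [pvRun_detect cs i p b k [] (Or.inl rfl) hilt c hc]
      simp only [pvStep]
      by_cases h1 : c = '/' ∧ tl.head? = some '/'
      · have h1' : c = '/' ∧ i + 1 < (cs.length : Int) ∧ PySem.List.pyGet? cs (i + 1) = some '/' :=
          ⟨h1.1, (hla '/').mp h1.2⟩
        rw [if_pos h1, if_pos h1']
        exact hAdv2 p b k [PvFrame.lc]
      · have h1' : ¬ (c = '/' ∧ i + 1 < (cs.length : Int) ∧
            PySem.List.pyGet? cs (i + 1) = some '/') :=
          fun hx => h1 ⟨hx.1, (hla '/').mpr hx.2⟩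
        rw [if_neg h1, if_neg h1']
        by_cases h2 : c = '/' ∧ tl.head? = some '*'
        · have h2' : c = '/' ∧ i + 1 < (cs.length : Int) ∧
              PySem.List.pyGet? cs (i + 1) = some '*' := ⟨h2.1, (hla '*').mp h2.2⟩
          rw [if_pos h2, if_pos h2']
          exact hAdv2 p b k [PvFrame.bc]
        · have h2' : ¬ (c = '/' ∧ i + 1 < (cs.length : Int) ∧
              PySem.List.pyGet? cs (i + 1) = some '*') :=
            fun hx => h2 ⟨hx.1, (hla '*').mpr hx.2⟩
          rw [if_neg h2, if_neg h2']
          by_cases h3 : c = '"'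
          · rw [if_pos h3, if_pos h3]
            by_cases h4 : pvPrevAt cs i = some '@' ∨
                (pvPrevAt cs (i - 1) = some '@' ∧ pvPrevAt cs i = some '$') ∨
                (pvPrevAt cs (i - 1) = some '$' ∧ pvPrevAt cs i = some '@')
            · rw [if_pos h4, if_pos ((pvVerbIff cs i hi hilt).mpr h4)]
              exact hAdv1 p b k [PvFrame.vs]
            · have h4' : ¬ ((0 < i ∧ PySem.List.pyGet? cs (i - 1) = some '@') ∨
                  (2 ≤ i ∧ (PySem.List.slice cs (some (i - 2)) (some i) = ['@', '$'] ∨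
                            PySem.List.slice cs (some (i - 2)) (some i) = ['$', '@']))) :=
                fun hx => h4 ((pvVerbIff cs i hi hilt).mp hx)
              rw [if_neg h4, if_neg h4', pvFlagEq cs i]
              exact hAdv1 p b k [PvFrame.st _]
          · rw [if_neg h3, if_neg h3]
            by_cases h5 : c = '\''
            · rw [if_pos h5, if_pos h5]
              exact hAdv1 p b k [PvFrame.ch]
            · rw [if_neg h5, if_neg h5]
              split_ifs <;> first
                | rfl
                | exact hAdv1 _ _ _ []
    | cons f t =>
      cases f with
      | lc =>
        conv_rhs => rw [pvRun.eq_def]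
        simp only [pvStep, dif_pos hilt, hc]
        by_cases hnl : c = '\n'
        · rw [if_pos hnl, if_pos hnl, ← hrest]
          exact pvBridge cs i p b k t hi
        · rw [if_neg hnl, if_neg hnl]
          exact hAdv1 p b k (PvFrame.lc :: t)
      | bc =>
        conv_rhs => rw [pvRun.eq_def]
        simp only [pvStep, dif_pos hilt, hc]
        by_cases hb : c = '*' ∧ tl.head? = some '/'
        · have hb' : c = '*' ∧ i + 1 < (cs.length : Int) ∧
              PySem.List.pyGet? cs (i + 1) = some '/' := ⟨hb.1, (hla '/').mp hb.2⟩
          rw [if_pos hb, if_pos hb']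
          exact hAdv2 p b k t
        · have hb' : ¬ (c = '*' ∧ i + 1 < (cs.length : Int) ∧
              PySem.List.pyGet? cs (i + 1) = some '/') :=
            fun hx => hb ⟨hx.1, (hla '/').mpr hx.2⟩
          rw [if_neg hb, if_neg hb']
          exact hAdv1 p b k (PvFrame.bc :: t)
      | vs =>
        conv_rhs => rw [pvRun.eq_def]
        simp only [pvStep, dif_pos hilt, hc]
        by_cases hq : c = '"'
        · rw [if_pos hq, if_pos hq]
          by_cases hqq : tl.head? = some '"'
          · have hqq' : i + 1 < (cs.length : Int) ∧ PySem.List.pyGet? cs (i + 1) = some '"' :=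
              (hla '"').mp hqq
            rw [if_pos hqq, if_pos hqq']
            exact hAdv2 p b k (PvFrame.vs :: t)
          · have hqq' : ¬ (i + 1 < (cs.length : Int) ∧
                PySem.List.pyGet? cs (i + 1) = some '"') :=
              fun hx => hqq ((hla '"').mpr hx)
            rw [if_neg hqq, if_neg hqq']
            exact hAdv1 p b k t
        · rw [if_neg hq, if_neg hq]
          exact hAdv1 p b k (PvFrame.vs :: t)
      | ch =>
        conv_rhs => rw [pvRun.eq_def]
        simp only [pvStep, dif_pos hilt, hc]
        by_cases hbsl : c = '\\'
        · rw [if_pos hbsl, if_pos hbsl]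
          exact hAdv2 p b k (PvFrame.ch :: t)
        · rw [if_neg hbsl, if_neg hbsl]
          by_cases hq : c = '\''
          · rw [if_pos hq, if_pos hq]
            exact hAdv1 p b k t
          · rw [if_neg hq, if_neg hq]
            exact hAdv1 p b k (PvFrame.ch :: t)
      | st interp =>
        conv_rhs => rw [pvRun.eq_def]
        simp only [pvStep, dif_pos hilt, hc]
        by_cases hbsl : c = '\\'
        · rw [if_pos hbsl, if_pos hbsl]
          exact hAdv2 p b k (PvFrame.st interp :: t)
        · rw [if_neg hbsl, if_neg hbsl]
          by_cases hin : interp = true ∧ c = '{' ∧ tl.head?.any (fun c2 => c2 != '{') = true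
          · have hin' : interp = true ∧ c = '{' ∧ i + 1 < (cs.length : Int) ∧
                PySem.List.pyGet? cs (i + 1) ≠ some '{' :=
              ⟨hin.1, hin.2.1, (pvBraceIff cs i tl hi hhead).mp hin.2.2⟩
            rw [if_pos hin, if_pos hin']
            exact hAdv1 p b k (PvFrame.itp 1 :: PvFrame.st interp :: t)
          · have hin' : ¬ (interp = true ∧ c = '{' ∧ i + 1 < (cs.length : Int) ∧
                PySem.List.pyGet? cs (i + 1) ≠ some '{') :=
              fun hx => hin ⟨hx.1, hx.2.1,
                (pvBraceIff cs i tl hi hhead).mpr ⟨hx.2.2.1, hx.2.2.2⟩⟩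
            rw [if_neg hin, if_neg hin']
            by_cases hq : c = '"'
            · rw [if_pos hq, if_pos hq]
              exact hAdv1 p b k t
            · rw [if_neg hq, if_neg hq]
              exact hAdv1 p b k (PvFrame.st interp :: t)
      | itp d =>
        rw [pvRun_detect cs i p b k (PvFrame.itp d :: t) (Or.inr ⟨d, t, rfl⟩) hilt c hc]
        simp only [pvStep]
        by_cases h1 : c = '/' ∧ tl.head? = some '/'
        · have h1' : c = '/' ∧ i + 1 < (cs.length : Int) ∧
              PySem.List.pyGet? cs (i + 1) = some '/' := ⟨h1.1, (hla '/').mp h1.2⟩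
          rw [if_pos h1, if_pos h1']
          exact hAdv2 p b k (PvFrame.lc :: PvFrame.itp d :: t)
        · have h1' : ¬ (c = '/' ∧ i + 1 < (cs.length : Int) ∧
              PySem.List.pyGet? cs (i + 1) = some '/') :=
            fun hx => h1 ⟨hx.1, (hla '/').mpr hx.2⟩
          rw [if_neg h1, if_neg h1']
          by_cases h2 : c = '/' ∧ tl.head? = some '*'
          · have h2' : c = '/' ∧ i + 1 < (cs.length : Int) ∧
                PySem.List.pyGet? cs (i + 1) = some '*' := ⟨h2.1, (hla '*').mp h2.2⟩
            rw [if_pos h2, if_pos h2']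
            exact hAdv2 p b k (PvFrame.bc :: PvFrame.itp d :: t)
          · have h2' : ¬ (c = '/' ∧ i + 1 < (cs.length : Int) ∧
                PySem.List.pyGet? cs (i + 1) = some '*') :=
              fun hx => h2 ⟨hx.1, (hla '*').mpr hx.2⟩
            rw [if_neg h2, if_neg h2']
            by_cases h3 : c = '"'
            · rw [if_pos h3, if_pos h3]
              by_cases h4 : pvPrevAt cs i = some '@' ∨
                  (pvPrevAt cs (i - 1) = some '@' ∧ pvPrevAt cs i = some '$') ∨
                  (pvPrevAt cs (i - 1) = some '$' ∧ pvPrevAt cs i = some '@')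
              · rw [if_pos h4, if_pos ((pvVerbIff cs i hi hilt).mpr h4)]
                exact hAdv1 p b k (PvFrame.vs :: PvFrame.itp d :: t)
              · have h4' : ¬ ((0 < i ∧ PySem.List.pyGet? cs (i - 1) = some '@') ∨
                    (2 ≤ i ∧ (PySem.List.slice cs (some (i - 2)) (some i) = ['@', '$'] ∨
                              PySem.List.slice cs (some (i - 2)) (some i) = ['$', '@']))) :=
                  fun hx => h4 ((pvVerbIff cs i hi hilt).mp hx)
                rw [if_neg h4, if_neg h4', pvFlagEq cs i]
                exact hAdv1 p b k (PvFrame.st _ :: PvFrame.itp d :: t)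
            · rw [if_neg h3, if_neg h3]
              by_cases h5 : c = '\''
              · rw [if_pos h5, if_pos h5]
                exact hAdv1 p b k (PvFrame.ch :: PvFrame.itp d :: t)
              · rw [if_neg h5, if_neg h5]
                split_ifs <;> first
                  | rfl
                  | exact hAdv1 _ _ _ _
termination_by (((cs.length : Int) - i).toNat, s.length)
decreasing_by
  all_goals first
    | exact pvDecL _ _ hilt (pvLt1 i)
    | exact pvDecL _ _ hilt (pvLt2 i)
    | exact pvDecR (pvLtLen _ _)

-- ===== VERDICT (by name: the statement is the Claim_ definition above) =====
theorem find_statement_end_py_spec : Claim_equal_find_statement_end_py := by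
  intro source start _ hpre
  show find_statement_end_py source start = find_statement_end_py_alt source start
  unfold find_statement_end_py find_statement_end_py_alt
  by_cases hge : (source.toList.length : Int) ≤ start
  · rw [if_pos hge, pvFindLoop.eq_def, dif_neg (by omega)]
  · rw [if_neg hge, pvTop source.toList start 0 0 0 hpre]
    exact (pvBridge source.toList start 0 0 0 [] hpre).symm
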